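-- pv_equiv track=rewrite | github.com/Santiago2132/MatematicasDiscretas | Python/Algoritmos/Picoprograma.py | validar_semilla
-- ===== SOURCE A (Python) =====
-- def validar_semilla(semilla):
--     str_semilla = str(semilla)
--     count = 1
--     last_digit = str_semilla[0]
--     for i in range(1, len(str_semilla)):
--         if str_semilla[i] == last_digit:
--             count += 1
--             if count > 3:
--                 return False
--         else:
--             count = 1
--             if str_semilla[i] == chr(ord(last_digit) + 1) or str_semilla[i] == chr(ord(last_digit) - 1):
--                 return False
--         last_digit = str_semilla[i]
--     return True
-- ===== SOURCE B (Python) =====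
-- def validar_semilla(semilla):
--     s = str(semilla)
--     if any(abs(ord(a) - ord(b)) == 1 for a, b in zip(s, s[1:])):
--         return False
--     return not any(a == b == c == d for a, b, c, d in zip(s, s[1:], s[2:], s[3:]))
-- ===== Notes on version B (the rewrite author's own statement) =====
-- stated objective: idiomatic
-- what changed: Replaces the single stateful scan with a run counter and early returns by two declarative any() passes: one over adjacent character pairs (abs ord-difference of one) and one over sliding windows of four equal characters.
import Mathlib
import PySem

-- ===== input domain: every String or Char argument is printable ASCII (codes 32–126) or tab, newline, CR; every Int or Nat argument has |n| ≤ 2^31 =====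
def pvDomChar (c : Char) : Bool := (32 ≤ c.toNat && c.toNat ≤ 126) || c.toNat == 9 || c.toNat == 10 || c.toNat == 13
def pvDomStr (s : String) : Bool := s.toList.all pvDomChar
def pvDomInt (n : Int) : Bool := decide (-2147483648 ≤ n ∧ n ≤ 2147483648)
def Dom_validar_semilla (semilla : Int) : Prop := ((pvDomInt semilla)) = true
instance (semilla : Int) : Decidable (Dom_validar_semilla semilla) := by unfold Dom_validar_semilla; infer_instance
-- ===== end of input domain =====

-- B replaces A's single stateful run-counter scan with two declarative passes
-- (adjacent-pair check, then 4-window run check); idiomatic, same O(n) cost.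


-- ===== PORT A =====
-- the for-loop over range(1, len) with state (count, last_digit) and early returns
def pvLoopA : List Char → Int → Char → Bool
  | [], _, _ => true
  | c :: rest, count, last =>
    if c == last then
      if count + 1 > 3 then false else pvLoopA rest (count + 1) c
    else
      -- str_semilla[i] == chr(ord(last)+1) or str_semilla[i] == chr(ord(last)-1)
      if (c.toNat : Int) == (last.toNat : Int) + 1 || (c.toNat : Int) == (last.toNat : Int) - 1 then
        false
      else pvLoopA rest 1 c

def validar_semilla (semilla : Int) : Bool :=
  match (PySem.Int.toStr semilla).toList with
  | [] => true        -- unreachable: str(int) is never empty (Python would raise on s[0])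
  | c0 :: rest => pvLoopA rest 1 c0

-- ===== PORT B =====
-- any(abs(ord(a) - ord(b)) == 1 for a, b in zip(s, s[1:]))
def pvHasAdj (cs : List Char) : Bool :=
  (cs.zip cs.tail).any (fun p => ((p.1.toNat : Int) - (p.2.toNat : Int)).natAbs == 1)

-- any(a == b == c == d for a, b, c, d in zip(s, s[1:], s[2:], s[3:]))
def pvHasRun4 : List Char → Bool
  | a :: b :: c :: d :: rest => (a == b && b == c && c == d) || pvHasRun4 (b :: c :: d :: rest)
  | _ => false

def validar_semilla_alt (semilla : Int) : Bool :=
  let cs := (PySem.Int.toStr semilla).toList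
  if pvHasAdj cs then false else !pvHasRun4 cs

-- ===== PRECONDITION & SPEC =====
def Spec_validar_semilla (semilla : Int) (out : Bool) : Prop := out = validar_semilla_alt semilla
instance (semilla : Int) (out : Bool) : Decidable (Spec_validar_semilla semilla out) := by unfold Spec_validar_semilla; infer_instance

-- ===== CLAIM (what is proved, stated in full; the proofs are below) =====
def Claim_equal_validar_semilla : Prop := ∀ (semilla : Int), Dom_validar_semilla semilla → Spec_validar_semilla semilla (validar_semilla semilla)

-- ===== LEMMAS AND PROOFS =====

theorem pvHasAdj_cons_cons (a b : Char) (l : List Char) :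
    pvHasAdj (a :: b :: l) = ((((a.toNat : Int) - (b.toNat : Int)).natAbs == 1) || pvHasAdj (b :: l)) := by
  simp [pvHasAdj]

theorem pvHasAdj_single (a : Char) : pvHasAdj [a] = false := by simp [pvHasAdj]

theorem pvAdjCond (c last : Char) :
    (((c.toNat : Int) == (last.toNat : Int) + 1 || (c.toNat : Int) == (last.toNat : Int) - 1))
      = (((last.toNat : Int) - (c.toNat : Int)).natAbs == 1) := by
  rw [Bool.eq_iff_iff]
  simp only [Bool.or_eq_true, beq_iff_eq]
  omega

theorem pvRun1 (last c : Char) (rest : List Char) (hlc : (last == c) = false) :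
    pvHasRun4 (last :: c :: rest) = pvHasRun4 (c :: rest) := by
  match rest with
  | [] => simp [pvHasRun4]
  | [d] => simp [pvHasRun4]
  | d :: e :: rest' => simp [pvHasRun4, hlc]

theorem pvRun2 (last c : Char) (rest : List Char) (hlc : (last == c) = false) :
    pvHasRun4 (last :: last :: c :: rest) = pvHasRun4 (c :: rest) := by
  match rest with
  | [] => simp [pvHasRun4]
  | d :: rest' =>
    have h1 := pvRun1 last c (d :: rest') hlc
    simp [pvHasRun4, hlc, h1]

theorem pvRun3 (last c : Char) (rest : List Char) (hlc : (last == c) = false) :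
    pvHasRun4 (last :: last :: last :: c :: rest) = pvHasRun4 (c :: rest) := by
  have h2 := pvRun2 last c rest hlc
  simp [pvHasRun4, hlc, h2]

-- a block of `count` copies of `last` (count ≤ 3) followed by a different char has no 4-run
theorem pvHasRun4_prefix (last c : Char) (rest : List Char) (count : Int)
    (hne : ¬ c = last) (h : count = 1 ∨ count = 2 ∨ count = 3) :
    pvHasRun4 (List.replicate count.toNat last ++ c :: rest) = pvHasRun4 (c :: rest) := by
  have hlc : (last == c) = false := by
    rw [beq_eq_false_iff_ne]; exact fun h' => hne h'.symm
  rcases h with h | h | h <;> subst h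
  · exact pvRun1 last c rest hlc
  · exact pvRun2 last c rest hlc
  · exact pvRun3 last c rest hlc

theorem pvLoopA_eq (cs : List Char) (count : Int) (last : Char)
    (h : count = 1 ∨ count = 2 ∨ count = 3) :
    pvLoopA cs count last
      = (!pvHasAdj (last :: cs) && !pvHasRun4 (List.replicate count.toNat last ++ cs)) := by
  induction cs generalizing count last with
  | nil =>
    have hr : pvHasRun4 (List.replicate count.toNat last) = false := by
      rcases h with h | h | h <;> subst h <;> simp [pvHasRun4, List.replicate]
    simp [pvLoopA, pvHasAdj_single, hr]
  | cons c rest ih =>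
    by_cases hc : c = last
    · subst hc
      rw [pvLoopA]
      simp only [beq_self_eq_true, if_true]
      have hadj : pvHasAdj (c :: c :: rest) = pvHasAdj (c :: rest) := by
        rw [pvHasAdj_cons_cons]; simp
      rcases h with h | h | h <;> subst h
      · rw [if_neg (by norm_num : ¬((1:Int) + 1 > 3)),
            show (1:Int) + 1 = 2 from rfl, ih 2 c (by omega), hadj,
            show List.replicate (Int.toNat 2) c ++ rest
               = List.replicate (Int.toNat 1) c ++ (c :: rest) from rfl]
      · rw [if_neg (by norm_num : ¬((2:Int) + 1 > 3)),
            show (2:Int) + 1 = 3 from rfl, ih 3 c (by omega), hadj,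
            show List.replicate (Int.toNat 3) c ++ rest
               = List.replicate (Int.toNat 2) c ++ (c :: rest) from rfl]
      · rw [if_pos (by norm_num : ((3:Int) + 1 > 3))]
        have hr : pvHasRun4 (c :: c :: c :: c :: rest) = true := by simp [pvHasRun4]
        simp [hr]
    · have hcb : (c == last) = false := by rw [beq_eq_false_iff_ne]; exact hc
      rw [pvLoopA, hcb]
      simp only [Bool.false_eq_true, if_false]
      rw [pvAdjCond]
      by_cases hadj : (((last.toNat : Int) - (c.toNat : Int)).natAbs == 1) = true
      · simp [hadj, pvHasAdj_cons_cons]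
      · have hadj' : (((last.toNat : Int) - (c.toNat : Int)).natAbs == 1) = false := by
          simpa using hadj
        rw [hadj']
        simp only [Bool.false_eq_true, if_false]
        rw [ih 1 c (by omega), pvHasAdj_cons_cons, hadj',
            pvHasRun4_prefix last c rest count hc h]
        simp

-- ===== VERDICT (by name: the statement is the Claim_ definition above) =====
theorem validar_semilla_spec : Claim_equal_validar_semilla := by
  intro semilla _
  unfold Spec_validar_semilla validar_semilla validar_semilla_alt
  generalize (PySem.Int.toStr semilla).toList = cs
  match cs with
  | [] => simp [pvHasAdj, pvHasRun4]
  | c0 :: rest =>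
    show pvLoopA rest 1 c0
        = (if pvHasAdj (c0 :: rest) then false else !pvHasRun4 (c0 :: rest))
    rw [pvLoopA_eq rest 1 c0 (Or.inl rfl),
        show List.replicate (Int.toNat 1) c0 ++ rest = c0 :: rest from rfl]
    cases hb : pvHasAdj (c0 :: rest) <;> simp
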